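-- pv_equiv track=rewrite | github.com/zoocoder/coding | maxSum.py | max_dist_sum
-- ===== SOURCE A (Python) =====
-- def max_dist_sum(arr, dist):
--     if len(arr)<= dist:
--         return 0
--     max_elem = arr[0]
--     max_sum = max_elem + arr[dist]
--
--     for i in range(dist, len(arr)):
--         #Set max_elem to maximum we've seen so far dist away from index.
--         if (max_elem < arr[i-dist]):
--             max_elem = arr[i-dist]
--
--         if (max_sum < arr[i] + max_elem):
--             max_sum = arr[i] + max_elem
--     return max_sum
-- ===== SOURCE B (Python) =====
-- def max_dist_sum(arr, dist):
--     if len(arr) <= dist: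
--         return 0
--     # one pass: materialize prefix maxima, then one pass over candidates
--     pm = []
--     m = arr[0]
--     for x in arr:
--         m = m if m > x else x
--         pm.append(m)
--     best = arr[dist] + pm[0]
--     for i in range(dist + 1, len(arr)):
--         c = arr[i] + pm[i - dist]
--         best = best if best > c else c
--     return best
-- ===== Notes on version B (the rewrite author's own statement) =====
-- stated objective: alternative
-- what changed: B replaces A's single loop carrying an incremental (max_elem, max_sum) pair by two independent passes: it first materializes the whole prefix-maximum list, then scans candidates arr[i]+pm[i-dist] with a plain running best.
import Mathlib
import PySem

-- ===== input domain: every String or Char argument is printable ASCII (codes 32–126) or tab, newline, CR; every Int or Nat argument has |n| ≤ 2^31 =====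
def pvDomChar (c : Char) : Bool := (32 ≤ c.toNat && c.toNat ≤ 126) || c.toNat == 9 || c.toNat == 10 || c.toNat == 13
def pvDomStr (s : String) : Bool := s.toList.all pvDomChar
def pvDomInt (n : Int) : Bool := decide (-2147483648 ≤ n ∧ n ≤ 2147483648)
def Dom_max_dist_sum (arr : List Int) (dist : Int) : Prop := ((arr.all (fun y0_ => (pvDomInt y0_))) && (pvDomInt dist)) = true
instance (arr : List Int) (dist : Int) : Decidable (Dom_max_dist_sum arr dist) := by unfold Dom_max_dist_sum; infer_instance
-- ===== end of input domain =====

-- B builds the prefix-maximum list in one pass and then scans candidates in a second pass;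
-- same values as A wherever A returns (dist ≥ 0).

-- ===== PORT A =====
def max_dist_sum (arr : List Int) (dist : Int) : Int :=
  if (arr.length : Int) ≤ dist then 0
  else
    let max_elem := PySem.List.pyGetD arr 0 0
    let max_sum := max_elem + PySem.List.pyGetD arr dist 0
    let st := (PySem.List.pyRange dist (arr.length : Int) 1).foldl
      (fun (p : Int × Int) i =>
        let me := if p.1 < PySem.List.pyGetD arr (i - dist) 0 then PySem.List.pyGetD arr (i - dist) 0 else p.1
        let ms := if p.2 < PySem.List.pyGetD arr i 0 + me then PySem.List.pyGetD arr i 0 + me else p.2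
        (me, ms)) (max_elem, max_sum)
    st.2

-- ===== PORT B =====
-- transliteration of Source B's first loop (same left-to-right traversal, same running max m,
-- prefix-maximum list produced in the same order)
def pmAux (m : Int) : List Int → List Int
  | [] => []
  | x :: xs => let m2 := if m > x then m else x; m2 :: pmAux m2 xs

def max_dist_sum_alt (arr : List Int) (dist : Int) : Int :=
  if (arr.length : Int) ≤ dist then 0
  else
    let pm := pmAux (PySem.List.pyGetD arr 0 0) arr
    let best := PySem.List.pyGetD arr dist 0 + PySem.List.pyGetD pm 0 0
    (PySem.List.pyRange (dist + 1) (arr.length : Int) 1).foldl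
      (fun best i =>
        let c := PySem.List.pyGetD arr i 0 + PySem.List.pyGetD pm (i - dist) 0
        if best > c then best else c) best

-- ===== PRECONDITION & SPEC =====
-- Pre_ excludes negative dist, on which A always raises IndexError (arr[i-dist] overruns
-- the list on the last iteration, or arr[0] on the empty list); B raises there too.
def Pre_max_dist_sum (_arr : List Int) (dist : Int) : Prop := 0 ≤ dist
instance (arr : List Int) (dist : Int) : Decidable (Pre_max_dist_sum arr dist) := by unfold Pre_max_dist_sum; infer_instance
def pvWitness_max_dist_sum : List Int × Int := ([3, -1, 4, 1], 2)

def Spec_max_dist_sum (arr : List Int) (dist : Int) (out : Int) : Prop := out = max_dist_sum_alt arr dist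
instance (arr : List Int) (dist : Int) (out : Int) : Decidable (Spec_max_dist_sum arr dist out) := by unfold Spec_max_dist_sum; infer_instance

-- ===== CLAIM (what is proved, stated in full; the proofs are below) =====
def Claim_equal_max_dist_sum : Prop := ∀ (arr : List Int) (dist : Int), Dom_max_dist_sum arr dist → Pre_max_dist_sum arr dist → Spec_max_dist_sum arr dist (max_dist_sum arr dist)

-- ===== LEMMAS AND PROOFS =====

theorem ifmax (m x : Int) : (if m < x then x else m) = max m x := by
  split_ifs <;> omega

theorem ifmax' (m x : Int) : (if m > x then m else x) = max m x := by
  split_ifs <;> omega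

theorem length_pmAux (m : Int) (xs : List Int) : (pmAux m xs).length = xs.length := by
  induction xs generalizing m with
  | nil => rfl
  | cons x xs ih => simp [pmAux, ih]

theorem pmAux_getD_zero (m x : Int) (xs : List Int) :
    (pmAux m (x :: xs)).getD 0 0 = max m x := by
  simp [pmAux, ifmax']

theorem pmAux_getD_succ (m : Int) (xs : List Int) (j : Nat) (hj : j + 1 < xs.length) :
    (pmAux m xs).getD (j + 1) 0 =
      max ((pmAux m xs).getD j 0) (xs.getD (j + 1) 0) := by
  induction xs generalizing m j with
  | nil => simp at hj
  | cons x xs ih =>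
    cases j with
    | zero =>
      cases xs with
      | nil => simp at hj
      | cons y ys =>
        simp only [pmAux, List.getD_cons_succ, List.getD_cons_zero]
        simp only [Int.max_def]
        split_ifs <;> omega
    | succ j =>
      simp only [pmAux, List.getD_cons_succ]
      exact ih _ j (by simpa using hj)

def Abody (arr : List Int) (d : Int) (p : Int × Int) (i : Int) : Int × Int :=
  let me := if p.1 < PySem.List.pyGetD arr (i - d) 0 then PySem.List.pyGetD arr (i - d) 0 else p.1
  let ms := if p.2 < PySem.List.pyGetD arr i 0 + me then PySem.List.pyGetD arr i 0 + me else p.2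
  (me, ms)

def Bbody (arr pm : List Int) (d : Int) (best i : Int) : Int :=
  let c := PySem.List.pyGetD arr i 0 + PySem.List.pyGetD pm (i - d) 0
  if best > c then best else c

theorem loopMain
    (arr pm : List Int) (d : Int) (_hd : 0 ≤ d)
    (hstep : ∀ i : Int, d + 1 ≤ i → i < (arr.length : Int) →
      PySem.List.pyGetD pm (i - d) 0 =
        max (PySem.List.pyGetD pm (i - 1 - d) 0) (PySem.List.pyGetD arr (i - d) 0)) :
    ∀ (c : Nat) (i m s : Int), d + 1 ≤ i → i + c = (arr.length : Int) →
      m = PySem.List.pyGetD pm (i - 1 - d) 0 →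
      ((PySem.List.pyRange i (arr.length : Int) 1).foldl (Abody arr d) (m, s)).2 =
      (PySem.List.pyRange i (arr.length : Int) 1).foldl (Bbody arr pm d) s := by
  intro c
  induction c with
  | zero =>
    intro i m s hi hic hm
    rw [PySem.List.pyRange_one_eq_nil (by omega)]
    rfl
  | succ c ih =>
    intro i m s hi hic hm
    rw [PySem.List.pyRange_one_cons (by omega)]
    simp only [List.foldl_cons]
    have hme : (if m < PySem.List.pyGetD arr (i - d) 0 then PySem.List.pyGetD arr (i - d) 0 else m)
        = PySem.List.pyGetD pm (i - d) 0 := by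
      rw [ifmax, hm, ← hstep i hi (by omega)]
    have hA : Abody arr d (m, s) i
        = (PySem.List.pyGetD pm (i - d) 0,
           max s (PySem.List.pyGetD arr i 0 + PySem.List.pyGetD pm (i - d) 0)) := by
      simp only [Abody, hme, ifmax]
    have hB : Bbody arr pm d s i
        = max s (PySem.List.pyGetD arr i 0 + PySem.List.pyGetD pm (i - d) 0) := by
      simp only [Bbody, ifmax']
    rw [hA, hB]
    have h1d : i + 1 - 1 - d = i - d := by ring
    exact ih (i + 1) _ _ (by omega) (by push_cast at hic ⊢; omega) (by rw [h1d])

theorem pyGetD_nn (xs : List Int) (i : Int) (h0 : 0 ≤ i) (h1 : i < (xs.length : Int)) :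
    PySem.List.pyGetD xs i 0 = xs.getD i.toNat 0 := by
  rw [PySem.List.pyGetD_eq_getElem xs 0 h0 h1, List.getD_eq_getElem]

theorem pm_step (arr : List Int) (d : Int) (hd : 0 ≤ d) (i : Int)
    (hi : d + 1 ≤ i) (hn : i < (arr.length : Int)) :
    PySem.List.pyGetD (pmAux (PySem.List.pyGetD arr 0 0) arr) (i - d) 0 =
      max (PySem.List.pyGetD (pmAux (PySem.List.pyGetD arr 0 0) arr) (i - 1 - d) 0)
          (PySem.List.pyGetD arr (i - d) 0) := by
  rw [pyGetD_nn (pmAux (PySem.List.pyGetD arr 0 0) arr) (i - d) (by omega)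
        (by simp only [length_pmAux]; omega),
      pyGetD_nn (pmAux (PySem.List.pyGetD arr 0 0) arr) (i - 1 - d) (by omega)
        (by simp only [length_pmAux]; omega),
      pyGetD_nn arr (i - d) (by omega) (by omega)]
  have hj : (i - d).toNat = (i - 1 - d).toNat + 1 := by omega
  rw [hj]
  exact pmAux_getD_succ _ _ _ (by rw [← hj]; omega)

theorem max_dist_sum_eq : ∀ (arr : List Int) (dist : Int), 0 ≤ dist →
    max_dist_sum arr dist = max_dist_sum_alt arr dist := by
  intro arr dist hd
  by_cases h : (arr.length : Int) ≤ dist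
  · simp [max_dist_sum, max_dist_sum_alt, h]
  · rw [not_le] at h
    obtain ⟨x, xs, rfl⟩ : ∃ x xs, arr = x :: xs := by
      cases arr with
      | nil => simp at h; omega
      | cons x xs => exact ⟨x, xs, rfl⟩
    simp only [max_dist_sum, max_dist_sum_alt, if_neg (not_le.mpr h)]
    have ha0 : PySem.List.pyGetD (x :: xs) 0 0 = x := PySem.List.pyGetD_zero_cons x xs 0
    have hpm0 : PySem.List.pyGetD (pmAux (PySem.List.pyGetD (x :: xs) 0 0) (x :: xs)) 0 0
        = PySem.List.pyGetD (x :: xs) 0 0 := by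
      rw [PySem.List.pyGetD_zero, ha0, pmAux_getD_zero, max_self]
    have hA : (fun (p : Int × Int) i =>
        let me := if p.1 < PySem.List.pyGetD (x :: xs) (i - dist) 0 then PySem.List.pyGetD (x :: xs) (i - dist) 0 else p.1
        let ms := if p.2 < PySem.List.pyGetD (x :: xs) i 0 + me then PySem.List.pyGetD (x :: xs) i 0 + me else p.2
        (me, ms)) = Abody (x :: xs) dist := rfl
    have hB : (fun (best i : Int) =>
        let c := PySem.List.pyGetD (x :: xs) i 0 + PySem.List.pyGetD (pmAux (PySem.List.pyGetD (x :: xs) 0 0) (x :: xs)) (i - dist) 0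
        if best > c then best else c) = Bbody (x :: xs) (pmAux (PySem.List.pyGetD (x :: xs) 0 0) (x :: xs)) dist := rfl
    rw [hA, hB, PySem.List.pyRange_one_cons h, List.foldl_cons]
    have hfirst : Abody (x :: xs) dist
        (PySem.List.pyGetD (x :: xs) 0 0,
         PySem.List.pyGetD (x :: xs) 0 0 + PySem.List.pyGetD (x :: xs) dist 0) dist
        = (PySem.List.pyGetD (x :: xs) 0 0,
           PySem.List.pyGetD (x :: xs) dist 0 + PySem.List.pyGetD (x :: xs) 0 0) := by
      simp only [Abody, ifmax, sub_self, max_self]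
      rw [add_comm (PySem.List.pyGetD (x :: xs) 0 0) (PySem.List.pyGetD (x :: xs) dist 0), max_self]
    rw [hfirst]
    rw [loopMain (x :: xs) (pmAux (PySem.List.pyGetD (x :: xs) 0 0) (x :: xs)) dist hd
          (fun i hi hn => pm_step (x :: xs) dist hd i hi hn)
          ((((x :: xs).length : Int)) - (dist + 1)).toNat (dist + 1)
          (PySem.List.pyGetD (x :: xs) 0 0)
          (PySem.List.pyGetD (x :: xs) dist 0 + PySem.List.pyGetD (x :: xs) 0 0)
          (by omega) (by omega)
          (by rw [show dist + 1 - 1 - dist = 0 by ring, hpm0])]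
    rw [hpm0]

-- ===== VERDICT (by name: the statement is the Claim_ definition above) =====
theorem max_dist_sum_spec : Claim_equal_max_dist_sum := by
  intro arr dist _ hpre
  exact max_dist_sum_eq arr dist hpre
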